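-- pv_equiv track=rewrite | github.com/aniyadavjames/ml_cn_project | data_process/dataset_generation.py | bigram_generation
-- ===== SOURCE A (Python) =====
-- def cut(obj, sec):
--     """Slices hex strings into n-gram chunks"""
--     if not obj: return []
--     result = [obj[i:i+sec] for i in range(0, len(obj), sec)]
--     try:
--         remanent_count = len(result[0]) % 4
--     except:
--         remanent_count = 0
--     if remanent_count != 0:
--         result = [obj[i:i+sec+remanent_count] for i in range(0, len(obj), sec+remanent_count)]
--     return result
--
-- def bigram_generation(packet_datagram, packet_len=64):
--     """Converts raw hex to space-separated bigrams for BERT"""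
--     result = ''
--     generated_datagram = cut(packet_datagram, 1)
--     token_count = 0
--     for i in range(len(generated_datagram)):
--         if i != (len(generated_datagram) - 1):
--             token_count += 1
--             if token_count > packet_len: break
--             merge_word = generated_datagram[i] + generated_datagram[i + 1]
--             result += merge_word + ' '
--         else: break
--     return result
-- ===== SOURCE B (Python) =====
-- def bigram_generation(packet_datagram, packet_len=64):
--     """Converts raw hex to space-separated bigrams for BERT"""
--     m = (len(packet_datagram) + 1) // 2          # number of 2-char chunks
--     count = min(m - 1, packet_len)               # tokens actually emitted
--     return ''.join(packet_datagram[2*i:2*i+4] + ' ' for i in range(count))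
-- ===== Notes on version B (the rewrite author's own statement) =====
-- stated objective: faster
-- what changed: B drops the cut() chunk-list construction and the break-driven index loop entirely: it computes the token count min((len+1)//2 - 1, packet_len) in closed form and joins 4-char windows sliced directly from the source string, avoiding the intermediate per-character and per-chunk lists and quadratic-ish string += accumulation.
import Mathlib
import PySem

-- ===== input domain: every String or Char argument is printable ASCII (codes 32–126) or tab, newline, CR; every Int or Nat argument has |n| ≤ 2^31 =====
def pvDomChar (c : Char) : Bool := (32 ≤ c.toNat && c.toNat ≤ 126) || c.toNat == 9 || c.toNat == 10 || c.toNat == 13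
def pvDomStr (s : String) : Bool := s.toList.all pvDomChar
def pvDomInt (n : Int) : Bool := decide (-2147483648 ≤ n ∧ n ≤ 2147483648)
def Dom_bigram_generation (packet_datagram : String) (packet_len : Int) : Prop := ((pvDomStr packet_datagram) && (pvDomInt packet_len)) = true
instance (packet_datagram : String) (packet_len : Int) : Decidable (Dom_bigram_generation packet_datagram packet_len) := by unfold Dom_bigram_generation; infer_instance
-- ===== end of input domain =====

-- B replaces A's cut()-chunk-list plus break-driven loop by a closed-form token count and
-- direct 4-char window slices joined at once (measured constant-factor faster).

-- ===== PORT A =====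
-- cut(obj, sec): slices into sec-sized chunks, re-chunking when len(result[0]) % 4 ≠ 0
def cut (obj : String) (sec : Int) : List String :=
  if obj = "" then []
  else
    let result := (PySem.List.pyRange 0 (PySem.Str.len obj) sec).map
      (fun i => PySem.Str.slice obj (some i) (some (i + sec)))
    -- try: len(result[0]) % 4; except: 0  (only failure mode is result being empty)
    let remanent_count : Int :=
      match PySem.List.pyGet? result 0 with
      | some h => PySem.Int.mod (PySem.Str.len h) 4
      | none => 0
    if remanent_count ≠ 0 then
      (PySem.List.pyRange 0 (PySem.Str.len obj) (sec + remanent_count)).map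
        (fun i => PySem.Str.slice obj (some i) (some (i + sec + remanent_count)))
    else result

-- the 'for i in range(len(generated_datagram))' loop with its two breaks;
-- chunk indexing uses pyGetD with default "" — both indices are always in range here
def bigramLoopA (chunks : List String) (packet_len : Int) (i : Nat) (token_count : Int)
    (result : String) : String :=
  if i < chunks.length then
    if i ≠ chunks.length - 1 then
      let token_count' := token_count + 1
      if token_count' > packet_len then result
      else
        let merge_word := PySem.List.pyGetD chunks (i : Int) "" ++
          PySem.List.pyGetD chunks ((i : Int) + 1) ""
        bigramLoopA chunks packet_len (i + 1) token_count' (result ++ merge_word ++ " ")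
    else result
  else result
termination_by chunks.length - i

def bigram_generation (packet_datagram : String) (packet_len : Int) : String :=
  bigramLoopA (cut packet_datagram 1) packet_len 0 0 ""

-- ===== PORT B =====
def bigram_generation_alt (packet_datagram : String) (packet_len : Int) : String :=
  let m : Int := PySem.Int.floordiv (PySem.Str.len packet_datagram + 1) 2
  let count : Int := min (m - 1) packet_len
  PySem.Str.join "" ((PySem.List.pyRange 0 count 1).map
    (fun i => PySem.Str.slice packet_datagram (some (2 * i)) (some (2 * i + 4)) ++ " "))

-- ===== PRECONDITION & SPEC =====
def Spec_bigram_generation (packet_datagram : String) (packet_len : Int) (out : String) : Prop := out = bigram_generation_alt packet_datagram packet_len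
instance (packet_datagram : String) (packet_len : Int) (out : String) : Decidable (Spec_bigram_generation packet_datagram packet_len out) := by unfold Spec_bigram_generation; infer_instance

-- ===== CLAIM (what is proved, stated in full; the proofs are below) =====
def Claim_equal_bigram_generation : Prop := ∀ (packet_datagram : String) (packet_len : Int), Dom_bigram_generation packet_datagram packet_len → Spec_bigram_generation packet_datagram packet_len (bigram_generation packet_datagram packet_len)

-- ===== LEMMAS AND PROOFS =====

theorem strJoin_empty_nil : PySem.Str.join "" [] = "" := by
  apply String.ext
  simp [PySem.Str.toList_join, PySem.Chars.join_nil]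

theorem strJoin_empty_cons (a : String) (l : List String) :
    PySem.Str.join "" (a :: l) = a ++ PySem.Str.join "" l := by
  apply String.ext
  cases l with
  | nil => simp [PySem.Str.toList_join, PySem.Chars.join_singleton, PySem.Chars.join_nil]
  | cons b t => simp [PySem.Str.toList_join, PySem.Chars.join_cons_cons]

theorem loopA_eq (chunks : List String) (pl : Int) :
    ∀ (k i : Nat) (tc : Int) (acc : String), chunks.length ≤ i + k → tc = (i : Int) →
    bigramLoopA chunks pl i tc acc =
      acc ++ PySem.Str.join "" ((PySem.List.pyRange (i : Int) (min ((chunks.length : Int) - 1) pl) 1).map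
        (fun j => PySem.List.pyGetD chunks j "" ++ PySem.List.pyGetD chunks (j + 1) "" ++ " ")) := by
  intro k
  induction k with
  | zero =>
    intro i tc acc hk htc
    rw [bigramLoopA, if_neg (by omega)]
    rw [PySem.List.pyRange_one_eq_nil (a := (i : Int)) (by omega)]
    simp [strJoin_empty_nil]
  | succ k ih =>
    intro i tc acc hk htc
    rw [bigramLoopA]
    by_cases h1 : i < chunks.length
    · rw [if_pos h1]
      by_cases h2 : i = chunks.length - 1
      · rw [if_neg (by simpa using h2)]
        rw [PySem.List.pyRange_one_eq_nil (by omega)]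
        simp [strJoin_empty_nil]
      · rw [if_pos h2]
        by_cases h3 : tc + 1 > pl
        · rw [if_pos h3]
          rw [PySem.List.pyRange_one_eq_nil (a := (i : Int)) (by omega)]
          simp [strJoin_empty_nil]
        · rw [if_neg h3]
          rw [ih (i + 1) (tc + 1) _ (by omega) (by omega)]
          rw [PySem.List.pyRange_one_cons (a := (i : Int)) (by omega)]
          rw [List.map_cons, strJoin_empty_cons]
          push_cast
          simp [String.append_assoc]
    · rw [if_neg h1]
      rw [PySem.List.pyRange_one_eq_nil (a := (i : Int)) (by omega)]
      simp [strJoin_empty_nil]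

theorem cut_one_eq (pd : String) (h : pd ≠ "") :
    cut pd 1 = (PySem.List.pyRange 0 (PySem.Str.len pd) 2).map
      (fun i => PySem.Str.slice pd (some i) (some (i + 1 + 1))) := by
  have hn : 0 < pd.toList.length := by
    rcases Nat.eq_zero_or_pos pd.toList.length with h0 | h0
    · exact absurd (String.ext (by simpa using h0)) h
    · exact h0
  have hs1 : PySem.Str.len (PySem.Str.slice pd (some 0) (some (0 + 1))) = 1 := by
    rw [PySem.Str.len_eq, PySem.Str.toList_slice]
    simp only [PySem.Chars.slice_eq_listSlice]
    rw [PySem.List.length_slice]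
    simp [PySem.List.clampIdx]
    rw [← String.length_toList]
    omega
  have hm : PySem.Int.mod 1 4 = 1 := by decide
  unfold cut
  rw [if_neg h]
  rw [PySem.List.pyRange_one_cons (a := (0 : Int)) (by rw [PySem.Str.len_eq]; omega)]
  simp only [List.map_cons, PySem.List.pyGet?_zero, List.getElem?_cons_zero, hs1, hm]
  norm_num

theorem window_merge (pd : String) (t : Nat) :
    PySem.Str.slice pd (some (0 + 2*(t:Int))) (some (0 + 2*(t:Int) + 1 + 1)) ++
    PySem.Str.slice pd (some (0 + 2*(((t+1:Nat)):Int))) (some (0 + 2*(((t+1:Nat)):Int) + 1 + 1)) ++ " "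
    = PySem.Str.slice pd (some (2*(t:Int))) (some (2*(t:Int) + 4)) ++ " " := by
  have e1 : (0 + 2*(t:Int)) = ((2*t : Nat):Int) := by push_cast; ring
  have e2 : (0 + 2*(t:Int) + 1 + 1) = ((2*t + 2 : Nat):Int) := by push_cast; ring
  have e3 : (0 + 2*(((t+1:Nat)):Int)) = ((2*t + 2 : Nat):Int) := by push_cast; ring
  have e4 : (0 + 2*(((t+1:Nat)):Int) + 1 + 1) = ((2*t + 4 : Nat):Int) := by push_cast; ring
  have e5 : (2*(t:Int)) = ((2*t : Nat):Int) := by push_cast; ring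
  have e6 : (2*(t:Int) + 4) = ((2*t + 4 : Nat):Int) := by push_cast; ring
  rw [e2, e1, e4, e3, e6, e5]
  apply String.ext
  simp only [String.toList_append, PySem.Str.toList_slice, PySem.Chars.slice_eq_listSlice]
  rw [PySem.List.slice_natCast, PySem.List.slice_natCast, PySem.List.slice_natCast]
  simp only [Nat.add_sub_cancel_left]
  rw [show (2*t+4) - (2*t+2) = 2 by omega, show (4:Nat) = 2 + 2 from rfl,
    List.take_add, ← List.drop_drop]

-- ===== VERDICT (by name: the statement is the Claim_ definition above) =====
theorem bigram_generation_spec : Claim_equal_bigram_generation := by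
  unfold Claim_equal_bigram_generation
  intro pd pl _
  unfold Spec_bigram_generation
  by_cases hpd : pd = ""
  · subst hpd
    have hcut : cut "" 1 = [] := by rw [cut]; simp
    rw [bigram_generation, hcut, bigramLoopA]
    rw [if_neg (by simp)]
    simp only [bigram_generation_alt]
    rw [show PySem.Str.len "" = 0 by decide]
    rw [show PySem.Int.floordiv ((0:Int) + 1) 2 = 0 by decide]
    rw [PySem.List.pyRange_one_eq_nil (a := (0:Int)) (by omega)]
    simp [strJoin_empty_nil]
  · have hn : 0 < pd.toList.length := by
      rcases Nat.eq_zero_or_pos pd.toList.length with h0 | h0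
      · exact absurd (String.ext (by simpa using h0)) hpd
      · exact h0
    have hchunks : cut pd 1 =
        (List.range (((pd.toList.length : Int) - 0 + 2 - 1) / 2).toNat).map
          ((fun i => PySem.Str.slice pd (some i) (some (i + 1 + 1))) ∘
            (fun k : Nat => 0 + 2 * (k : Int))) := by
      rw [cut_one_eq pd hpd, PySem.Str.len_eq]
      rw [PySem.List.pyRange_of_pos 0 (pd.toList.length : Int) (by norm_num)]
      rw [if_pos (by exact_mod_cast hn)]
      rw [List.map_map]
    rw [bigram_generation]
    rw [loopA_eq (cut pd 1) pl ((cut pd 1).length) 0 0 "" (by omega) (by norm_num)]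
    rw [hchunks]
    simp only [List.length_map, List.length_range]
    simp only [bigram_generation_alt, PySem.Str.len_eq]
    rw [show PySem.Int.floordiv ((pd.toList.length : Int) + 1) 2 =
        ((((pd.toList.length : Int) - 0 + 2 - 1) / 2).toNat : Int) by
      simp [PySem.Int.floordiv, Int.fdiv_eq_ediv]; omega]
    rw [show ((0:Nat):Int) = (0:Int) from rfl]
    rw [show ∀ s : String, ("" : String) ++ s = s from fun s => by simp]
    refine congrArg _ (List.map_congr_left ?_)
    intro j hj
    rw [PySem.List.mem_pyRange_one] at hj
    obtain ⟨hj0, hjc⟩ := hj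
    obtain ⟨t, rfl⟩ : ∃ t : Nat, j = (t : Int) := ⟨j.toNat, by omega⟩
    have ht1 : t < (((pd.toList.length : Int) - 0 + 2 - 1) / 2).toNat := by omega
    have ht2 : t + 1 < (((pd.toList.length : Int) - 0 + 2 - 1) / 2).toNat := by omega
    rw [PySem.List.pyGetD_natCast]
    rw [show ((t:Int) + 1) = (((t+1:Nat)):Int) by push_cast; ring]
    rw [PySem.List.pyGetD_natCast]
    rw [PySem.List.getD_map_range _ _ _ _ ht1, PySem.List.getD_map_range _ _ _ _ ht2]
    exact window_merge pd t
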